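-- pv_equiv track=rewrite | github.com/PuffedRiceCrackers/algorithmChallenge | 3 190627 MATCHORDER GR.py | calc
-- ===== SOURCE A (Python) =====
-- def calc(rusia, korea):
--     if len(rusia) == 1:
--         return rusia[0] <= korea[0] and 1 or 0
--
--     # 'korea' was sorted : iterating from 0 gives the winning member with the min rating,
--     for i in range(len(korea)):
--
--         # A winning member exists -> remove that member
--         if rusia[0] <= korea[i]:
--             del korea[i]
--             del rusia[0]
--             return 1 + calc(rusia, korea)
--         # A winning member does not exist -> remove memeber with smallest rating
--         if i == len(korea) - 1:
--             del korea[0]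
--             del rusia[0]
--             return 0 + calc(rusia, korea)
-- ===== SOURCE B (Python) =====
-- def calc(rusia, korea):
--     total = 0
--     rem = list(korea)
--     # every Russian but the last picks the first remaining Korean that can beat him
--     # (or, failing that, knocks out the front Korean)
--     for r in rusia[:-1]:
--         j = 0
--         while j < len(rem) and rem[j] < r:
--             j += 1
--         if j < len(rem):
--             rem = rem[:j] + rem[j + 1:]
--             total += 1
--         else:
--             rem = rem[1:]
--     # the last Russian plays the front remaining Korean
--     if rusia and rusia[-1] <= rem[0]:
--         total += 1
--     return total
-- ===== Notes on version B (the rewrite author's own statement) =====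
-- stated objective: alternative
-- what changed: A's self-recursive function that mutates both lists with del is replaced by a single non-recursive fold over rusia carrying (remaining korea, count) with an explicit index scan for the first beating member; B does not mutate its arguments.
-- outside the precondition, e.g. on calc([], []): A returns None, B returns 0; on calc([1, 2], [3]): A raises IndexError, B raises IndexError
import Mathlib
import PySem

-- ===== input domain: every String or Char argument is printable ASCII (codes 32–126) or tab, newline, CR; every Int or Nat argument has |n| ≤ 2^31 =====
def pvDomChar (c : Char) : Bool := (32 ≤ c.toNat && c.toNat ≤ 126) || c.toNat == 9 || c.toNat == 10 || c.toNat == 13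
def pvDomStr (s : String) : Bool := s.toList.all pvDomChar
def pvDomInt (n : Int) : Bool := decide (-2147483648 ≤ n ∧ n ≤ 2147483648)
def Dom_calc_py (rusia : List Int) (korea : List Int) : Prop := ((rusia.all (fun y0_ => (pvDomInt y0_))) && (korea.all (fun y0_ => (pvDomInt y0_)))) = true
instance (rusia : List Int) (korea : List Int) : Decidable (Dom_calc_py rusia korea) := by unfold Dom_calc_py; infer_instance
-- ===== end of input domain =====

-- B replaces A's self-recursion with in-place `del`s by a single non-recursive fold over
-- rusia carrying (remaining korea, count); A mutates both argument lists in place and B does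
-- not, so the equivalence proved here is about the RETURN value only.

-- ===== PORT A =====
-- A's `for i in range(len(korea))` loop: `some i` means the first branch fired at index i
-- (a winning member exists), `none` means the `i == len(korea)-1` branch fired (or, for
-- korea = [], the loop fell through; calc_py disambiguates by emptiness below).
def calcScanA (r0 : Int) (korea : List Int) (i : Nat) : Option Nat :=
  if h : i < korea.length then
    if r0 ≤ korea[i] then some i
    else if i = korea.length - 1 then none
    else calcScanA r0 korea (i + 1)
  else none
termination_by korea.length - i

def calc_py (rusia : List Int) (korea : List Int) : Int :=
  if rusia.length = 1 then
    match PySem.List.pyGet? rusia 0, PySem.List.pyGet? korea 0 with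
    | some r, some k => if r ≤ k then 1 else 0   -- `rusia[0] <= korea[0] and 1 or 0`
    | _, _ => 0                                   -- korea = []: IndexError (excluded by Pre_)
  else
    match rusia with
    | [] => 0                                     -- rusia[0] raises / loop returns None (excluded by Pre_)
    | r0 :: rtail =>
      match calcScanA r0 korea 0 with
      | some i => 1 + calc_py rtail (korea.eraseIdx i)   -- del korea[i]; del rusia[0]
      | none =>
        if korea.isEmpty then 0                   -- loop fell through: Python returns None (excluded by Pre_)
        else 0 + calc_py rtail (korea.drop 1)     -- del korea[0]; del rusia[0]
termination_by rusia.length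
decreasing_by all_goals simp

-- ===== PORT B =====
-- `j = 0; while j < len(rem) and rem[j] < r: j += 1`
def findJB (r : Int) (rem : List Int) (j : Nat) : Nat :=
  if h : j < rem.length then
    if rem[j] < r then findJB r rem (j + 1) else j
  else j
termination_by rem.length - j

-- the loop body: rem[:j] + rem[j+1:] and total += 1, or rem[1:]  (j ≥ 0, so take/drop are exact)
def stepB (st : List Int × Int) (r : Int) : List Int × Int :=
  let j := findJB r st.1 0
  if j < st.1.length then (st.1.take j ++ st.1.drop (j + 1), st.2 + 1)
  else (st.1.drop 1, st.2)

def calc_py_alt (rusia : List Int) (korea : List Int) : Int :=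
  let st := rusia.dropLast.foldl stepB (korea, 0)   -- `for r in rusia[:-1]: …`
  match rusia.getLast? with                          -- `if rusia and rusia[-1] <= rem[0]:`
  | none => st.2
  | some rl =>
    match st.1.head? with                            -- rem[0] (raises when rem = []: outside Pre_)
    | none => st.2
    | some k0 => if rl ≤ k0 then st.2 + 1 else st.2

-- ===== PRECONDITION & SPEC =====
-- Exactly the inputs on which the Python A returns an int: on a shorter (or empty) korea it
-- either raises IndexError or falls off the loop / base case and returns None.
def Pre_calc_py (rusia : List Int) (korea : List Int) : Prop :=
  rusia ≠ [] ∧ rusia.length ≤ korea.length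
instance (rusia : List Int) (korea : List Int) : Decidable (Pre_calc_py rusia korea) := by
  unfold Pre_calc_py; infer_instance

def pvWitness_calc_py : List Int × List Int := ([3, 1], [2, 4])

def Spec_calc_py (rusia : List Int) (korea : List Int) (out : Int) : Prop := out = calc_py_alt rusia korea
instance (rusia : List Int) (korea : List Int) (out : Int) : Decidable (Spec_calc_py rusia korea out) := by unfold Spec_calc_py; infer_instance

-- ===== CLAIM (what is proved, stated in full; the proofs are below) =====
def Claim_equal_calc_py : Prop := ∀ (rusia : List Int) (korea : List Int), Dom_calc_py rusia korea → Pre_calc_py rusia korea → Spec_calc_py rusia korea (calc_py rusia korea)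

-- ===== LEMMAS AND PROOFS =====

theorem findJB_ge (r : Int) (rem : List Int) (j : Nat) (h : ¬ j < rem.length) :
    findJB r rem j = j := by
  rw [findJB]; simp [h]

-- A's loop and B's while-loop find the same thing: A fires its first branch exactly at the
-- index B's scan stops at (when that is in range), and fires its second branch otherwise.
theorem calcScanA_eq_findJB (r : Int) (korea : List Int) (i : Nat) :
    calcScanA r korea i =
      if findJB r korea i < korea.length then some (findJB r korea i) else none := by
  induction i using calcScanA.induct r korea with
  | case1 i h hle =>
    rw [calcScanA, findJB]
    simp [h, hle, not_lt.mpr hle]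
  | case2 h hle =>
    rw [calcScanA, findJB]
    have h1 : ¬ korea.length - 1 + 1 < korea.length := by omega
    simp [h, hle, not_le.mp hle, findJB_ge r korea (korea.length - 1 + 1) h1]
    omega
  | case3 i h hle hlast ih =>
    rw [calcScanA, findJB]
    simp [h, hle, hlast, not_le.mp hle, ih]
  | case4 i h =>
    rw [calcScanA, findJB]
    simp [h]

-- the list component of the fold ignores the accumulator, and the accumulator splits off
theorem foldl_stepB_split (rusia : List Int) (rem : List Int) (t : Int) :
    rusia.foldl stepB (rem, t)
      = ((rusia.foldl stepB (rem, 0)).1, t + (rusia.foldl stepB (rem, 0)).2) := by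
  induction rusia generalizing rem t with
  | nil => simp
  | cons r rs ih =>
    by_cases h : findJB r rem 0 < rem.length
    · simp only [List.foldl_cons, stepB, if_pos h]
      rw [ih _ (t + 1), ih _ (0 + 1)]
      simp [Prod.ext_iff]
      ring
    · simp only [List.foldl_cons, stepB, if_neg h]
      rw [ih _ t]

-- unrolling B by its first loop iteration (rusia has at least two members)
theorem alt_cons (r0 : Int) (rtail korea : List Int) (h : rtail ≠ []) :
    calc_py_alt (r0 :: rtail) korea
      = (stepB (korea, 0) r0).2 + calc_py_alt rtail (stepB (korea, 0) r0).1 := by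
  cases rtail with
  | nil => exact absurd rfl h
  | cons r1 rs =>
    unfold calc_py_alt
    simp only [List.dropLast_cons₂, List.foldl_cons, List.getLast?_cons_cons]
    rw [foldl_stepB_split ((r1 :: rs).dropLast) (stepB (korea, 0) r0).1 (stepB (korea, 0) r0).2]
    cases (r1 :: rs).getLast? with
    | none => simp
    | some rl =>
      cases ((r1 :: rs).dropLast.foldl stepB ((stepB (korea, 0) r0).1, 0)).1.head? with
      | none => simp
      | some k0 =>
        by_cases hle : rl ≤ k0
        · simp [hle]
          ring
        · simp [hle]

theorem main_equiv (rusia : List Int) (korea : List Int)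
    (hne : rusia ≠ []) (hlen : rusia.length ≤ korea.length) :
    calc_py rusia korea = calc_py_alt rusia korea := by
  induction rusia generalizing korea with
  | nil => exact absurd rfl hne
  | cons r0 rtail ih =>
    cases rtail with
    | nil =>
      cases korea with
      | nil => simp at hlen
      | cons k ks =>
        by_cases hrk : r0 ≤ k
        · simp [calc_py, calc_py_alt, hrk]
        · simp [calc_py, calc_py_alt, hrk]
    | cons r1 rs =>
      have hlen2 : 2 ≤ korea.length := by simp at hlen ⊢; omega
      have hne1 : ¬ (r0 :: r1 :: rs).length = 1 := by simp
      rw [calc_py]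
      simp only [hne1, if_false]
      rw [calcScanA_eq_findJB, alt_cons r0 (r1 :: rs) korea (by simp)]
      by_cases hj : findJB r0 korea 0 < korea.length
      · rw [if_pos hj]
        have hstep : stepB (korea, 0) r0
            = (korea.take (findJB r0 korea 0) ++ korea.drop (findJB r0 korea 0 + 1), 0 + 1) := by
          simp only [stepB, if_pos hj]
        rw [hstep]
        dsimp only
        rw [List.eraseIdx_eq_take_drop_succ]
        rw [ih _ (by simp) (by simp at hlen ⊢; omega)]
        ring
      · rw [if_neg hj]
        have hkne : ¬ korea.isEmpty := by
          cases korea with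
          | nil => simp at hlen2
          | cons a as => simp
        have hstep : stepB (korea, 0) r0 = (korea.drop 1, 0) := by
          simp only [stepB, if_neg hj]
        rw [hstep]
        dsimp only
        simp only [hkne, if_false, Bool.false_eq_true]
        rw [ih _ (by simp) (by simp at hlen ⊢; omega)]

-- ===== VERDICT (by name: the statement is the Claim_ definition above) =====
theorem calc_py_spec : Claim_equal_calc_py := by
  intro rusia korea _ hpre
  exact main_equiv rusia korea hpre.1 hpre.2
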